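-- pv_equiv track=rewrite | github.com/juangiacobbe15/pruebas-tecnicas | jueves_tecnico_1/main.py | obtenerPalabrasCortas
-- ===== SOURCE A (Python) =====
-- def transformarTexto(frase):
--     fraseFinal = frase.lower()
--     fraseFinal = fraseFinal.replace(",", "")
--     fraseFinal = fraseFinal.replace(".", "")
--
--     return fraseFinal
--
-- def obtenerLogitudMasCorta(arreglo):
--   longitudMasCorta = len(arreglo[0])
--   for palabra in arreglo:
--       if (len(palabra) < longitudMasCorta):
--           longitudMasCorta = len(palabra)
--
--   return longitudMasCorta
--
-- def obtenerPalabrasCortas(frase):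
--     fraseFinal = transformarTexto(frase)
--     fraseArreglo = fraseFinal.split(" ")
--
--     longitudMasCorta = obtenerLogitudMasCorta(fraseArreglo)
--
--     listaPalabrasCortas = []
--
--     for palabra in fraseArreglo:
--         if ((len(palabra) == longitudMasCorta) and (palabra not in listaPalabrasCortas)):
--             listaPalabrasCortas.append(palabra)
--
--     return listaPalabrasCortas
-- ===== SOURCE B (Python) =====
-- def obtenerPalabrasCortas(frase):
--     palabras = frase.lower().replace(",", "").replace(".", "").split(" ")
--     minimo = len(palabras[0])
--     cortas = []
--     for palabra in palabras:
--         n = len(palabra)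
--         if n < minimo:
--             minimo = n
--             cortas = [palabra]
--         elif n == minimo and palabra not in cortas:
--             cortas.append(palabra)
--     return cortas
-- ===== Notes on version B (the rewrite author's own statement) =====
-- stated objective: alternative
-- what changed: Replaces A's two passes (find the minimum word length, then collect words of that length) with one fused pass that keeps a running minimum and resets the collected list whenever a strictly shorter word appears.
import Mathlib
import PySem

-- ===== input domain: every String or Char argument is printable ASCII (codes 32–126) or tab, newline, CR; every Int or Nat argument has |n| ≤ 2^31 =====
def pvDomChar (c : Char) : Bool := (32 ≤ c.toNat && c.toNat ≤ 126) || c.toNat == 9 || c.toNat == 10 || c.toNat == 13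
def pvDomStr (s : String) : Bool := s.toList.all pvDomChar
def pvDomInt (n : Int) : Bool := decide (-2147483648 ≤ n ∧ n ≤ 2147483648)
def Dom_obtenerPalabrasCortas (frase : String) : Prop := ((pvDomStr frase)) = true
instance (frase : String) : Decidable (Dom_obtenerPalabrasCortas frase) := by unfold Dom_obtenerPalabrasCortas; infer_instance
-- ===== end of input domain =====

-- B fuses A's two passes (find min length, then collect) into one pass with a running
-- minimum that resets the collected list when a strictly shorter word appears (objective: alternative).

-- ===== PORT A =====
def transformarTexto (frase : String) : String :=
  PySem.Str.replace (PySem.Str.replace (PySem.Str.lower frase) "," "") "." ""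

-- Python computes len(arreglo[0]): IndexError on []. Unreachable from obtenerPalabrasCortas
-- (split(" ") always returns at least one piece); the [] branch returns 0 only to be total.
def obtenerLogitudMasCorta (arreglo : List String) : Nat :=
  match arreglo with
  | [] => 0
  | w :: _ =>
    arreglo.foldl (fun m palabra => if palabra.length < m then palabra.length else m) w.length

def obtenerPalabrasCortas (frase : String) : List String :=
  let fraseArreglo := (PySem.Str.split? (transformarTexto frase) " ").getD []
  let longitudMasCorta := obtenerLogitudMasCorta fraseArreglo
  fraseArreglo.foldl
    (fun acc palabra =>
      if palabra.length == longitudMasCorta && !acc.contains palabra then acc ++ [palabra] else acc)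
    []

-- ===== PORT B =====
-- Python computes len(palabras[0]): IndexError on []. Unreachable (split(" ") never returns []).
def obtenerPalabrasCortas_alt (frase : String) : List String :=
  let palabras := (PySem.Str.split? (transformarTexto frase) " ").getD []
  match palabras with
  | [] => []
  | w :: _ =>
    (palabras.foldl
      (fun st palabra =>
        if palabra.length < st.1 then (palabra.length, [palabra])
        else if palabra.length == st.1 && !st.2.contains palabra then (st.1, st.2 ++ [palabra])
        else st)
      (w.length, ([] : List String))).2

-- ===== PRECONDITION & SPEC =====
def Spec_obtenerPalabrasCortas (frase : String) (out : List String) : Prop := out = obtenerPalabrasCortas_alt frase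
instance (frase : String) (out : List String) : Decidable (Spec_obtenerPalabrasCortas frase out) := by unfold Spec_obtenerPalabrasCortas; infer_instance

-- ===== CLAIM (what is proved, stated in full; the proofs are below) =====
def Claim_equal_obtenerPalabrasCortas : Prop := ∀ (frase : String), Dom_obtenerPalabrasCortas frase → Spec_obtenerPalabrasCortas frase (obtenerPalabrasCortas frase)

-- ===== LEMMAS AND PROOFS =====

def pvMinStep (m : Nat) (w : String) : Nat := if w.length < m then w.length else m

def pvStepA (m : Nat) (acc : List String) (w : String) : List String :=
  if w.length == m && !acc.contains w then acc ++ [w] else acc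

def pvStepB (st : Nat × List String) (w : String) : Nat × List String :=
  if w.length < st.1 then (w.length, [w])
  else if w.length == st.1 && !st.2.contains w then (st.1, st.2 ++ [w])
  else st

lemma pvMinFold_le (ws : List String) (m : Nat) : ws.foldl pvMinStep m ≤ m := by
  induction ws generalizing m with
  | nil => simp [List.foldl]
  | cons w ws ih =>
    simp only [List.foldl]
    refine le_trans (ih _) ?_
    unfold pvMinStep
    split <;> omega

lemma pvFused (ws : List String) (m : Nat) (lst : List String)
    (h : ∀ x ∈ lst, x.length = m) :
    ws.foldl pvStepB (m, lst) =
      (ws.foldl pvMinStep m,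
       ws.foldl (pvStepA (ws.foldl pvMinStep m))
         (if ws.foldl pvMinStep m == m then lst else [])) := by
  induction ws generalizing m lst with
  | nil => simp [List.foldl]
  | cons w ws ih =>
    simp only [List.foldl]
    by_cases hlt : w.length < m
    · have hstepB : pvStepB (m, lst) w = (w.length, [w]) := by
        simp [pvStepB, hlt]
      have hmin : pvMinStep m w = w.length := by simp [pvMinStep, hlt]
      rw [hstepB]
      simp only [hmin]
      rw [ih w.length [w] (by intro x hx; simp at hx; subst hx; rfl)]
      have hM : ws.foldl pvMinStep w.length ≤ w.length := pvMinFold_le ws w.length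
      have hMm : ¬ ((ws.foldl pvMinStep w.length == m) = true) := by
        simp; omega
      simp only [if_neg hMm]
      have hstepA : pvStepA (ws.foldl pvMinStep w.length) [] w =
          (if (ws.foldl pvMinStep w.length == w.length) = true then [w] else []) := by
        by_cases he : w.length = ws.foldl pvMinStep w.length
        · simp [pvStepA, ← he]
        · have he' : ¬ (ws.foldl pvMinStep w.length = w.length) := fun hh => he hh.symm
          simp [pvStepA, he, he']
      rw [hstepA]
    · have hstepB : pvStepB (m, lst) w = (m, pvStepA m lst w) := by
        simp only [pvStepB, pvStepA]
        rw [if_neg hlt]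
        split <;> rfl
      have hmin : pvMinStep m w = m := by simp [pvMinStep, hlt]
      rw [hstepB]
      simp only [hmin]
      have h' : ∀ x ∈ pvStepA m lst w, x.length = m := by
        intro x hx
        simp only [pvStepA] at hx
        split at hx
        · rcases List.mem_append.1 hx with hx | hx
          · exact h x hx
          · simp at hx; subst hx
            rename_i hc
            rw [Bool.and_eq_true] at hc
            exact beq_iff_eq.mp hc.1
        · exact h x hx
      rw [ih m (pvStepA m lst w) h']
      have hM : ws.foldl pvMinStep m ≤ m := pvMinFold_le ws m
      by_cases he : ws.foldl pvMinStep m = m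
      · simp [he]
      · have he' : ¬ ((ws.foldl pvMinStep m == m) = true) := by simp [he]
        simp only [if_neg he']
        congr 1
        have hne : w.length ≠ ws.foldl pvMinStep m := by omega
        simp [pvStepA, hne]

def pvRunA (ws : List String) : List String :=
  ws.foldl (pvStepA (obtenerLogitudMasCorta ws)) []

def pvRunB (ws : List String) : List String :=
  match ws with
  | [] => []
  | w :: _ => (ws.foldl pvStepB (w.length, [])).2

lemma pvRun_eq (ws : List String) : pvRunA ws = pvRunB ws := by
  cases ws with
  | nil => rfl
  | cons w rest =>
    show (w :: rest).foldl (pvStepA (obtenerLogitudMasCorta (w :: rest))) [] =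
      ((w :: rest).foldl pvStepB (w.length, [])).2
    rw [pvFused (w :: rest) w.length [] (by intro x hx; simp at hx)]
    have hA : obtenerLogitudMasCorta (w :: rest) = (w :: rest).foldl pvMinStep w.length := rfl
    rw [hA]
    congr 1
    split <;> rfl

lemma pvPortA_eq (frase : String) :
    obtenerPalabrasCortas frase = pvRunA ((PySem.Str.split? (transformarTexto frase) " ").getD []) := rfl

lemma pvPortB_eq (frase : String) :
    obtenerPalabrasCortas_alt frase = pvRunB ((PySem.Str.split? (transformarTexto frase) " ").getD []) := by
  unfold obtenerPalabrasCortas_alt pvRunB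
  generalize ((PySem.Str.split? (transformarTexto frase) " ").getD []) = ws
  cases ws <;> rfl

-- ===== VERDICT (by name: the statement is the Claim_ definition above) =====
theorem obtenerPalabrasCortas_spec : Claim_equal_obtenerPalabrasCortas := by
  intro frase _
  show obtenerPalabrasCortas frase = obtenerPalabrasCortas_alt frase
  rw [pvPortA_eq, pvPortB_eq, pvRun_eq]
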